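-- pv_equiv track=rewrite | github.com/rohiCoder/Kamyroll-Python | scripts/python/utils.py | check_characters
-- ===== SOURCE A (Python) =====
-- def check_characters(title):
--     characters = ['\\', '/', ':', '*', '?', '"', '<', '>', '|', '\n', '\r']
--     if not title:
--         return title
--     for character in characters:
--         if character in title:
--             title = title.replace(character, '')
--     return title.strip()
-- ===== SOURCE B (Python) =====
-- def check_characters(title):
--     if not title:
--         return title
--     forbidden = set('\\/:*?"<>|\n\r')
--     return ''.join(c for c in title if c not in forbidden).strip()
-- ===== Notes on version B (the rewrite author's own statement) =====
-- stated objective: idiomatic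
-- what changed: Replaces eleven sequential membership-test-plus-replace scans over the string with one single-pass filter against a set of forbidden characters, joined and stripped.
import Mathlib
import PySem

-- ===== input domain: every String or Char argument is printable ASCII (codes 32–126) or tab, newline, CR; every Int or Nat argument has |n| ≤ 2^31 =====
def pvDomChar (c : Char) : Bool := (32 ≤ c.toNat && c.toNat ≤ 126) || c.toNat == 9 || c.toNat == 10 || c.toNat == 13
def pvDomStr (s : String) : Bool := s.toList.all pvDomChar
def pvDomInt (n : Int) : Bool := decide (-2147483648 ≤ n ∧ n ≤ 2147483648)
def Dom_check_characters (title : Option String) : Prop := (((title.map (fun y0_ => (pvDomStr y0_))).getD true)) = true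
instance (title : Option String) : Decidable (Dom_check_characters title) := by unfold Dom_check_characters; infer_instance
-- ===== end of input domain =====

-- B strips the forbidden characters in one pass (filter against a set) instead of eleven
-- sequential membership-test-plus-replace scans; return value only, no side effects.
-- ===== PORT A =====
def check_characters (title : Option String) : Option String :=
  match title with
  | none => none
  | some t =>
    if t = "" then some t
    else
      let characters : List Char := ['\\', '/', ':', '*', '?', '"', '<', '>', '|', '\n', '\r']
      let final := characters.foldl
        (fun s c => if PySem.Chars.isIn [c] s then PySem.Chars.replace s [c] [] else s) t.toList
      some (String.mk (PySem.Chars.strip final))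

-- ===== PORT B =====
def pvForbidden : List Char := ['\\', '/', ':', '*', '?', '"', '<', '>', '|', '\n', '\r']

def check_characters_alt (title : Option String) : Option String :=
  match title with
  | none => none
  | some t =>
    if t = "" then some t
    else
      some (String.mk (PySem.Chars.strip
        (t.toList.filter (fun c => !(pvForbidden.contains c)))))

-- ===== PRECONDITION & SPEC =====
def Spec_check_characters (title : Option String) (out : Option String) : Prop := out = check_characters_alt title
instance (title : Option String) (out : Option String) : Decidable (Spec_check_characters title out) := by unfold Spec_check_characters; infer_instance

-- ===== CLAIM (what is proved, stated in full; the proofs are below) =====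
def Claim_equal_check_characters : Prop := ∀ (title : Option String), Dom_check_characters title → Spec_check_characters title (check_characters title)

-- ===== LEMMAS AND PROOFS =====

-- ===== VERDICT (by name: the statement is the Claim_ definition above) =====
-- replace s [c] '' removes every occurrence of c
theorem replace_go_single (c : Char) : ∀ (fuel : Nat) (l acc : List Char), l.length ≤ fuel →
    PySem.Chars.replace.go [c] [] fuel l acc = acc.reverse ++ l.filter (fun x => x != c) := by
  intro fuel
  induction fuel with
  | zero =>
    intro l acc h
    have : l = [] := List.eq_nil_of_length_eq_zero (Nat.le_zero.mp h)
    subst this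
    simp [PySem.Chars.replace.go]
  | succ n ih =>
    intro l acc h
    match l with
    | [] => simp [PySem.Chars.replace.go]
    | x :: t =>
      rw [PySem.Chars.replace.go]
      by_cases hx : x = c
      · subst hx
        have hp : List.isPrefixOf [x] (x :: t) = true := by
          simp [List.isPrefixOf]
        simp only [hp, if_pos]
        rw [ih]
        · simp
        · simpa using Nat.le_of_succ_le_succ h
      · have hp : List.isPrefixOf [c] (x :: t) = false := by
          simp [List.isPrefixOf]
          exact fun hc => (hx hc.symm).elim
        simp only [hp]
        rw [ih t (x :: acc) (by simpa using Nat.le_of_succ_le_succ h)]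
        simp [hx]

theorem replace_single (c : Char) (s : List Char) :
    PySem.Chars.replace s [c] [] = s.filter (fun x => x != c) := by
  rw [PySem.Chars.replace]
  simp only [List.isEmpty_cons, Bool.false_eq_true, if_false]
  exact replace_go_single c s.length s [] (le_refl _)

theorem step_eq (c : Char) (s : List Char) :
    (if PySem.Chars.isIn [c] s then PySem.Chars.replace s [c] [] else s)
      = s.filter (fun x => x != c) := by
  by_cases h : PySem.Chars.isIn [c] s
  · rw [if_pos h, replace_single]
  · rw [if_neg h]
    have hnotmem : c ∉ s := by
      intro hc
      apply h
      rw [PySem.Chars.isIn_iff_infix]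
      obtain ⟨l1, l2, rfl, -⟩ := List.eq_append_cons_of_mem hc
      exact ⟨l1, l2, by simp⟩
    symm
    apply List.filter_eq_self.mpr
    intro a ha
    simp only [bne_iff_ne, ne_eq]
    exact fun he => hnotmem (he ▸ ha)

theorem fold_eq (cs : List Char) : ∀ (s : List Char),
    cs.foldl (fun s c => if PySem.Chars.isIn [c] s then PySem.Chars.replace s [c] [] else s) s
      = s.filter (fun x => !(cs.contains x)) := by
  induction cs with
  | nil => intro s; simp
  | cons c cs ih =>
    intro s
    rw [List.foldl_cons, step_eq, ih, List.filter_filter]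
    apply List.filter_congr
    intro a _
    simp only [List.contains_cons, Bool.not_or, Bool.and_comm]
    rfl

theorem check_characters_spec : Claim_equal_check_characters := by
  intro title _
  unfold Spec_check_characters check_characters check_characters_alt
  match title with
  | none => rfl
  | some t =>
    simp only
    split
    · rfl
    · rw [fold_eq]
      rfl
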